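-- pv_equiv track=rewrite | github.com/vijaychandar186/advanced-programming-practices | exercises/lab13_automata/nfa_vowel.py | nfa_a_no_consecutive_b
-- ===== SOURCE A (Python) =====
-- def nfa_a_no_consecutive_b(s: str) -> bool:
--     """
--     NFA subset-construction simulation.
--     Transitions:
--       q0 on 'a' → {q1}
--       q0 on 'b' → {}             (must start with 'a')
--       q1 on 'a' → {q1, q2}       (single char "a" is also accepted)
--       q1 on 'b' → {q3}
--       q2 on 'a' → {q2}
--       q2 on 'b' → {q3}
--       q3 on 'a' → {q2}
--       q3 on 'b' → {q4}  (consecutive b)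
--       q4 on * → {q4}             (trap)
--     Accept: {q1, q2}
--     """
--     transitions = {
--         "q0": {"a": {"q1"},       "b": set()},
--         "q1": {"a": {"q1", "q2"}, "b": {"q3"}},
--         "q2": {"a": {"q2"},       "b": {"q3"}},
--         "q3": {"a": {"q2"},       "b": {"q4"}},
--         "q4": {"a": {"q4"},       "b": {"q4"}},
--     }
--     accept_states = {"q1", "q2"}
--
--     states = {"q0"}
--     for ch in s:
--         next_states: set[str] = set()
--         for st in states:
--             next_states |= transitions.get(st, {}).get(ch, set())
--         states = next_states
--
--     return bool(states & accept_states)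
-- ===== SOURCE B (Python) =====
-- def nfa_a_no_consecutive_b(s: str) -> bool:
--     # Direct single-pass scan that tracks only the previous character,
--     # instead of simulating the NFA with a set of states.
--     if not s or s[0] != 'a':
--         return False
--     prev = 'a'
--     for ch in s[1:]:
--         if ch not in ('a', 'b') or (ch == 'b' and prev == 'b'):
--             return False
--         prev = ch
--     return prev == 'a'
-- ===== Notes on version B (the rewrite author's own statement) =====
-- stated objective: simpler
-- what changed: Replaced the NFA subset-construction (dict of transition sets, folding a set of states) with a direct single-pass scan tracking only the previous character, with early exit on rejection.
import Mathlib
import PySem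

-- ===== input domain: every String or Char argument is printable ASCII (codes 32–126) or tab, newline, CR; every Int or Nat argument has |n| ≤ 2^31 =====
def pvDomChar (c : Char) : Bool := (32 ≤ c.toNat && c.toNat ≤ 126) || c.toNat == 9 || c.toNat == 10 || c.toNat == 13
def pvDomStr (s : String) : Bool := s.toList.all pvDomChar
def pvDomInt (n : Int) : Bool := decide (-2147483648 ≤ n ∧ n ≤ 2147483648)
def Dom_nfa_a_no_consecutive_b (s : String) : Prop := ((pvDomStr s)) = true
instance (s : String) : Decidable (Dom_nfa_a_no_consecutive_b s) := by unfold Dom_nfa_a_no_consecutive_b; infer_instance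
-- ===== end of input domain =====

-- B replaces A's NFA subset-construction by a direct previous-character scan (simpler); same result.

-- ===== PORT A =====
def pvTransitions : PySem.Dict String (PySem.Dict Char (PySem.Set String)) :=
  PySem.Dict.ofList [
    ("q0", PySem.Dict.ofList [('a', PySem.Set.ofList ["q1"]), ('b', PySem.Set.empty)]),
    ("q1", PySem.Dict.ofList [('a', PySem.Set.ofList ["q1", "q2"]), ('b', PySem.Set.ofList ["q3"])]),
    ("q2", PySem.Dict.ofList [('a', PySem.Set.ofList ["q2"]), ('b', PySem.Set.ofList ["q3"])]),
    ("q3", PySem.Dict.ofList [('a', PySem.Set.ofList ["q2"]), ('b', PySem.Set.ofList ["q4"])]),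
    ("q4", PySem.Dict.ofList [('a', PySem.Set.ofList ["q4"]), ('b', PySem.Set.ofList ["q4"])])]

def pvAccept : PySem.Set String := PySem.Set.ofList ["q1", "q2"]

-- A's inner loop: next_states |= transitions.get(st, {}).get(ch, set())
def pvStep (states : PySem.Set String) (ch : Char) : PySem.Set String :=
  states.foldl
    (fun ns st => PySem.Set.union ns
      (PySem.Dict.getD (PySem.Dict.getD pvTransitions st PySem.Dict.empty) ch PySem.Set.empty))
    PySem.Set.empty

def nfa_a_no_consecutive_b (s : String) : Bool :=
  let states := s.toList.foldl pvStep (PySem.Set.ofList ["q0"])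
  -- bool(states & accept_states): nonempty intersection
  !(PySem.Set.inter states pvAccept).isEmpty

-- ===== PORT B =====
def pvScan : Char → List Char → Bool
  | prev, [] => prev == 'a'
  | prev, c :: rest =>
    if (!(c == 'a') && !(c == 'b')) || (c == 'b' && prev == 'b') then false
    else pvScan c rest

def nfa_a_no_consecutive_b_alt (s : String) : Bool :=
  match s.toList with
  | [] => false
  | c :: rest => if c == 'a' then pvScan 'a' rest else false

-- ===== PRECONDITION & SPEC =====
def Spec_nfa_a_no_consecutive_b (s : String) (out : Bool) : Prop := out = nfa_a_no_consecutive_b_alt s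
instance (s : String) (out : Bool) : Decidable (Spec_nfa_a_no_consecutive_b s out) := by unfold Spec_nfa_a_no_consecutive_b; infer_instance

-- ===== CLAIM (what is proved, stated in full; the proofs are below) =====
def Claim_equal_nfa_a_no_consecutive_b : Prop := ∀ (s : String), Dom_nfa_a_no_consecutive_b s → Spec_nfa_a_no_consecutive_b s (nfa_a_no_consecutive_b s)

-- ===== LEMMAS AND PROOFS =====

-- A's accept test at the end (bool(states & accept_states))
def pvAcc (states : PySem.Set String) : Bool := !(PySem.Set.inter states pvAccept).isEmpty

-- a character outside {'a','b'} contributes nothing for any state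
lemma pvInner_other (st : String) (c : Char) (ha : c ≠ 'a') (hb : c ≠ 'b') :
    PySem.Dict.getD (PySem.Dict.getD pvTransitions st PySem.Dict.empty) c PySem.Set.empty
      = PySem.Set.empty := by
  have h1 : ¬ ('a' = c) := fun h => ha h.symm
  have h2 : ¬ ('b' = c) := fun h => hb h.symm
  have e : pvTransitions = PySem.Dict.mk [
    ("q0", PySem.Dict.mk [('a', PySem.Set.ofList ["q1"]), ('b', PySem.Set.empty)]),
    ("q1", PySem.Dict.mk [('a', PySem.Set.ofList ["q1", "q2"]), ('b', PySem.Set.ofList ["q3"])]),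
    ("q2", PySem.Dict.mk [('a', PySem.Set.ofList ["q2"]), ('b', PySem.Set.ofList ["q3"])]),
    ("q3", PySem.Dict.mk [('a', PySem.Set.ofList ["q2"]), ('b', PySem.Set.ofList ["q4"])]),
    ("q4", PySem.Dict.mk [('a', PySem.Set.ofList ["q4"]), ('b', PySem.Set.ofList ["q4"])])] := by rfl
  rw [e]
  simp [PySem.Dict.getD_eq_get?_getD, PySem.Dict.get?_mk_cons]
  split_ifs <;> simp_all [PySem.Dict.get?_mk_cons] <;> rfl

-- stepping any state set on a character outside {'a','b'} empties it
lemma pvStep_other (S : PySem.Set String) (c : Char) (ha : c ≠ 'a') (hb : c ≠ 'b') :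
    pvStep S c = PySem.Set.empty := by
  unfold pvStep
  have key : ∀ (l : List String) (acc : PySem.Set String),
      l.foldl (fun ns st => PySem.Set.union ns
        (PySem.Dict.getD (PySem.Dict.getD pvTransitions st PySem.Dict.empty) c PySem.Set.empty)) acc
        = acc := by
    intro l
    induction l with
    | nil => intro acc; rfl
    | cons x xs ih =>
      intro acc
      simp only [List.foldl_cons, pvInner_other x c ha hb]
      exact ih acc
  exact key S PySem.Set.empty

-- dead configurations ({"q4"} or the empty set) stay dead and never accept
lemma pvDead (l : List Char) (S : PySem.Set String)
    (h : S = PySem.Set.ofList ["q4"] ∨ S = PySem.Set.empty) :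
    pvAcc (l.foldl pvStep S) = false := by
  induction l generalizing S with
  | nil => rcases h with h | h <;> subst h <;> decide
  | cons c rest ih =>
    simp only [List.foldl_cons]
    rcases h with h | h <;> subst h
    · by_cases hca : c = 'a'
      · subst hca
        rw [show pvStep (PySem.Set.ofList ["q4"]) 'a' = PySem.Set.ofList ["q4"] from by decide]
        exact ih _ (Or.inl rfl)
      · by_cases hcb : c = 'b'
        · subst hcb
          rw [show pvStep (PySem.Set.ofList ["q4"]) 'b' = PySem.Set.ofList ["q4"] from by decide]
          exact ih _ (Or.inl rfl)
        · rw [pvStep_other _ c hca hcb]; exact ih _ (Or.inr rfl)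
    · rw [show pvStep PySem.Set.empty c = PySem.Set.empty from rfl]
      exact ih _ (Or.inr rfl)

-- main invariant: the live state sets of A correspond to B's previous character
lemma pvLive (l : List Char) (prev : Char) (S : PySem.Set String)
    (h : (prev = 'a' ∧ (S = PySem.Set.ofList ["q1"] ∨ S = PySem.Set.ofList ["q1", "q2"]
            ∨ S = PySem.Set.ofList ["q2"]))
       ∨ (prev = 'b' ∧ S = PySem.Set.ofList ["q3"])) :
    pvAcc (l.foldl pvStep S) = pvScan prev l := by
  induction l generalizing prev S with
  | nil =>
    rcases h with ⟨hp, hS | hS | hS⟩ | ⟨hp, hS⟩ <;> subst hp <;> subst hS <;> decide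
  | cons c rest ih =>
    simp only [List.foldl_cons, pvScan]
    by_cases hca : c = 'a'
    · subst hca
      have hcond : ((!('a' == 'a') && !('a' == 'b')) || ('a' == 'b' && prev == 'b')) = false := by
        simp
      rw [hcond, if_neg (by simp)]
      rcases h with ⟨hp, hS⟩ | ⟨hp, hS⟩
      · rcases hS with hS | hS | hS <;> subst hS
        · rw [show pvStep (PySem.Set.ofList ["q1"]) 'a' = PySem.Set.ofList ["q1", "q2"] from by decide]
          exact ih 'a' _ (Or.inl ⟨rfl, Or.inr (Or.inl rfl)⟩)
        · rw [show pvStep (PySem.Set.ofList ["q1", "q2"]) 'a' = PySem.Set.ofList ["q1", "q2"] from by decide]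
          exact ih 'a' _ (Or.inl ⟨rfl, Or.inr (Or.inl rfl)⟩)
        · rw [show pvStep (PySem.Set.ofList ["q2"]) 'a' = PySem.Set.ofList ["q2"] from by decide]
          exact ih 'a' _ (Or.inl ⟨rfl, Or.inr (Or.inr rfl)⟩)
      · subst hS
        rw [show pvStep (PySem.Set.ofList ["q3"]) 'a' = PySem.Set.ofList ["q2"] from by decide]
        exact ih 'a' _ (Or.inl ⟨rfl, Or.inr (Or.inr rfl)⟩)
    · by_cases hcb : c = 'b'
      · subst hcb
        rcases h with ⟨hp, hS⟩ | ⟨hp, hS⟩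
        · subst hp
          rw [show ((!('b' == 'a') && !('b' == 'b')) || ('b' == 'b' && 'a' == 'b')) = false from by decide,
            if_neg (by simp)]
          rcases hS with hS | hS | hS <;> subst hS
          · rw [show pvStep (PySem.Set.ofList ["q1"]) 'b' = PySem.Set.ofList ["q3"] from by decide]
            exact ih 'b' _ (Or.inr ⟨rfl, rfl⟩)
          · rw [show pvStep (PySem.Set.ofList ["q1", "q2"]) 'b' = PySem.Set.ofList ["q3"] from by decide]
            exact ih 'b' _ (Or.inr ⟨rfl, rfl⟩)
          · rw [show pvStep (PySem.Set.ofList ["q2"]) 'b' = PySem.Set.ofList ["q3"] from by decide]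
            exact ih 'b' _ (Or.inr ⟨rfl, rfl⟩)
        · subst hp; subst hS
          rw [show ((!('b' == 'a') && !('b' == 'b')) || ('b' == 'b' && 'b' == 'b')) = true from by decide,
            if_pos rfl]
          rw [show pvStep (PySem.Set.ofList ["q3"]) 'b' = PySem.Set.ofList ["q4"] from by decide]
          exact pvDead rest _ (Or.inl rfl)
      · have hcond : ((!(c == 'a') && !(c == 'b')) || (c == 'b' && prev == 'b')) = true := by
          simp [hca, hcb]
        rw [hcond, if_pos rfl, pvStep_other S c hca hcb]
        exact pvDead rest _ (Or.inr rfl)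

-- ===== VERDICT (by name: the statement is the Claim_ definition above) =====
theorem nfa_a_no_consecutive_b_spec : Claim_equal_nfa_a_no_consecutive_b := by
  unfold Claim_equal_nfa_a_no_consecutive_b
  intro s _
  unfold Spec_nfa_a_no_consecutive_b nfa_a_no_consecutive_b nfa_a_no_consecutive_b_alt
  cases hsl : s.toList with
  | nil => decide
  | cons c rest =>
    simp only [List.foldl_cons]
    by_cases hca : c = 'a'
    · subst hca
      rw [show pvStep (PySem.Set.ofList ["q0"]) 'a' = PySem.Set.ofList ["q1"] from by decide,
        if_pos (by simp)]
      exact pvLive rest 'a' _ (Or.inl ⟨rfl, Or.inl rfl⟩)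
    · rw [if_neg (by simpa using hca)]
      by_cases hcb : c = 'b'
      · subst hcb
        rw [show pvStep (PySem.Set.ofList ["q0"]) 'b' = PySem.Set.empty from by decide]
        exact pvDead rest _ (Or.inr rfl)
      · rw [pvStep_other _ c hca hcb]
        exact pvDead rest _ (Or.inr rfl)
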